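-- pv_equiv track=rewrite | github.com/openview2017/leetcode-group-solution | InterViewQuestions/OA/Amazon/Distinct characters sum in string/Solution.py | distinctCharCount
-- ===== SOURCE A (Python) =====
-- def distinctCharCount(s):
--     most_recent_idx = dict()
--     result = 0
--     for i in range(len(s)):
--         if s[i] not in most_recent_idx:
--             closest = -1
--         else:
--             closest = most_recent_idx[s[i]]
--         result += (i-closest) * (len(s)-i)
--         most_recent_idx[s[i]] = i
--     return result
-- ===== SOURCE B (Python) =====
-- def _tri(g):
--     return g * (g + 1) // 2
--
-- def distinctCharCount(s):
--     n = len(s)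
--     occ = {}
--     for i in range(n):
--         occ.setdefault(s[i], []).append(i)
--     total = _tri(n)
--     result = 0
--     for ps in occ.values():
--         miss = _tri(ps[0])
--         for a, b in zip(ps, ps[1:]):
--             miss += _tri(b - a - 1)
--         miss += _tri(n - 1 - ps[-1])
--         result += total - miss
--     return result
-- ===== Notes on version B (the rewrite author's own statement) =====
-- stated objective: alternative
-- what changed: Instead of a single left-to-right pass that tracks each character's most recent index in a dict, B groups the indices by character and computes each character's contribution as total substrings n(n+1)/2 minus the triangle numbers of the gaps before, between and after its occurrences.
import Mathlib
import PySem

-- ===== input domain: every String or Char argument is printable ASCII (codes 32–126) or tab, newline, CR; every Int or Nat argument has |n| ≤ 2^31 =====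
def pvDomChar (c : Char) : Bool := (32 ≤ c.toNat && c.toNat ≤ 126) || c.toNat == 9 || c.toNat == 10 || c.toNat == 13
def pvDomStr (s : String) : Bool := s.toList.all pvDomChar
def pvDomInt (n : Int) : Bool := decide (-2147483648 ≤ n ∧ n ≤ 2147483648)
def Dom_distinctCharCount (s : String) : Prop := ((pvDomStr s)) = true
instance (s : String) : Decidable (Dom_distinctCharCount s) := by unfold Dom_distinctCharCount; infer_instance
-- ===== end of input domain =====

-- B regroups the sum by character: total substrings minus the substrings inside the gaps
-- between consecutive occurrences of each character (objective: alternative decomposition).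

-- ===== PORT A =====
-- A: one left-to-right pass keeping, per character, the most recent index in a dict.
def distinctCharCount (s : String) : Int :=
  let cs := s.toList
  (((List.range cs.length).foldl
      (fun (st : PySem.Dict Char Int × Int) i =>
        (st.1.insert (cs.getD i ' ') (i : Int),
         st.2 + ((i : Int) - (match st.1.get? (cs.getD i ' ') with
                              | none => -1
                              | some v => v)) * ((cs.length : Int) - (i : Int))))
      (PySem.Dict.empty, 0))).2

-- ===== PORT B =====
-- helper _tri of Source B: g * (g + 1) // 2
def pvTri (g : Int) : Int := PySem.Int.floordiv (g * (g + 1)) 2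

-- B: group indices by character (occ.setdefault(s[i], []).append(i), ported as Dict.modify
-- with default [], which yields the same dict), then per character
-- subtract the gap triangles from the total.  ps is never empty, so ps[0] / ps[-1]
-- (ported with pyGetD) cannot raise in Python.
def distinctCharCount_alt (s : String) : Int :=
  let cs := s.toList
  let n := cs.length
  let occ := (List.range n).foldl
      (fun (d : PySem.Dict Char (List Int)) i =>
        d.modify (cs.getD i ' ') [] (fun v => v ++ [(i : Int)])) PySem.Dict.empty
  let total := pvTri (n : Int)
  occ.values.foldl
    (fun r ps =>
      let m0 := pvTri (PySem.List.pyGetD ps 0 0)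
      let m1 := (ps.zip (PySem.List.slice ps (some 1) none)).foldl
          (fun m ab => m + pvTri (ab.2 - ab.1 - 1)) m0
      let m2 := m1 + pvTri ((n : Int) - 1 - PySem.List.pyGetD ps (-1) 0)
      r + (total - m2)) 0

-- ===== PRECONDITION & SPEC =====
def Spec_distinctCharCount (s : String) (out : Int) : Prop := out = distinctCharCount_alt s
instance (s : String) (out : Int) : Decidable (Spec_distinctCharCount s out) := by unfold Spec_distinctCharCount; infer_instance

-- ===== CLAIM (what is proved, stated in full; the proofs are below) =====
def Claim_equal_distinctCharCount : Prop := ∀ (s : String), Dom_distinctCharCount s → Spec_distinctCharCount s (distinctCharCount s)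

-- ===== LEMMAS AND PROOFS =====

lemma pvTri_double (x : Int) : 2 * pvTri x = x * (x + 1) := by
  unfold pvTri
  rw [PySem.Int.floordiv_eq_ediv_of_pos (by norm_num)]
  rcases Int.even_mul_succ_self x with ⟨k, hk⟩
  omega

def sumPrev (n : Int) : Int → List Int → Int
  | _, [] => 0
  | q, p :: t => (p - q) * (n - p) + sumPrev n p t

def missFrom (n : Int) : Int → List Int → Int
  | q, [] => pvTri (n - 1 - q)
  | q, p :: t => pvTri (p - q - 1) + missFrom n p t

lemma miss_sumPrev (n : Int) : ∀ (ps : List Int) (q : Int),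
    missFrom n q ps + sumPrev n q ps = pvTri (n - 1 - q) := by
  intro ps
  induction ps with
  | nil => intro q; simp [missFrom, sumPrev]
  | cons p t ih =>
    intro q
    simp only [missFrom, sumPrev]
    have h := ih p
    have h1 := pvTri_double (p - q - 1)
    have h2 := pvTri_double (n - 1 - p)
    have h3 := pvTri_double (n - 1 - q)
    nlinarith [h, h1, h2, h3]

lemma zip_miss (n : Int) : ∀ (t : List Int) (p m : Int),
    ((p :: t).zip t).foldl (fun m ab => m + pvTri (ab.2 - ab.1 - 1)) m
      + pvTri (n - 1 - (p :: t).getLast (List.cons_ne_nil p t))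
    = m + missFrom n p t := by
  intro t
  induction t with
  | nil => intro p m; simp [missFrom]
  | cons b t' ih =>
    intro p m
    simp only [List.zip_cons_cons, List.foldl_cons, List.getLast_cons_cons] at *
    rw [show ((b :: t').getLast (by simp)) = ((b :: t').getLast (List.cons_ne_nil b t')) from rfl]
    rw [ih b (m + pvTri (b - p - 1))]
    simp only [missFrom]
    ring

lemma sumPrev_append (n : Int) : ∀ (L : List Int) (q x : Int),
    sumPrev n q (L ++ [x]) = sumPrev n q L + (x - L.getLast?.getD q) * (n - x) := by
  intro L
  induction L with
  | nil => intro q x; simp [sumPrev]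
  | cons p t ih =>
    intro q x
    simp only [List.cons_append, sumPrev, ih p x]
    cases t with
    | nil => simp [sumPrev]
    | cons b t' =>
      cases hlast : (b :: t').getLast? with
      | none => simp at hlast
      | some y => simp [List.getLast?_cons_cons, hlast]; ring

def occIdx (cs : List Char) (c : Char) (j : ℕ) : List ℕ :=
  (List.range j).filter (fun i => cs.getD i ' ' == c)

def prevI (cs : List Char) (i : ℕ) : Int :=
  match (occIdx cs (cs.getD i ' ') i).getLast? with
  | some p => (p : Int)
  | none => -1

def fTerm (cs : List Char) (i : ℕ) : Int :=
  ((i : Int) - prevI cs i) * ((cs.length : Int) - (i : Int))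

lemma occIdx_succ (cs : List Char) (c : Char) (j : ℕ) :
    occIdx cs c (j + 1) = occIdx cs c j ++ (if cs.getD j ' ' == c then [j] else []) := by
  unfold occIdx
  rw [List.range_succ, List.filter_append]
  by_cases h : cs[j]?.getD ' ' = c <;> simp [List.getD, h]

lemma sum_map_ite_of_nodup (K : List Char) (a : Char) (x : Int)
    (hnd : K.Nodup) (ha : a ∈ K) :
    (K.map (fun c => if a = c then x else 0)).sum = x := by
  induction K with
  | nil => simp at ha
  | cons h t ih =>
    rcases List.mem_cons.mp ha with rfl | hat
    · have hnot : a ∉ t := (List.nodup_cons.mp hnd).1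
      have : (t.map (fun c => if a = c then x else 0)).sum = 0 := by
        apply List.sum_eq_zero
        intro y hy
        rcases List.mem_map.mp hy with ⟨c, hc, rfl⟩
        simp only [ite_eq_right_iff]
        intro h; exact absurd (h ▸ hc) hnot
      rw [List.map_cons, List.sum_cons, if_pos rfl, this, add_zero]
    · have hne : a ≠ h := by rintro rfl; exact (List.nodup_cons.mp hnd).1 hat
      simp only [List.map_cons, List.sum_cons, if_neg hne, zero_add]
      exact ih (List.nodup_cons.mp hnd).2 hat

lemma occ_sum (cs : List Char) (c : Char) : ∀ (j : ℕ),
    sumPrev (cs.length : Int) (-1) ((occIdx cs c j).map (fun i : ℕ => (i : Int)))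
      = ((occIdx cs c j).map (fTerm cs)).sum := by
  intro j
  induction j with
  | zero => simp [occIdx, sumPrev]
  | succ j ih =>
    rw [occIdx_succ]
    by_cases h : cs.getD j ' ' = c
    · rw [if_pos (beq_iff_eq.mpr h)]
      rw [show ((occIdx cs c j ++ [j]).map (fun i : ℕ => (i : Int)))
            = (occIdx cs c j).map (fun i : ℕ => (i : Int)) ++ [(j : Int)] by
          rw [List.map_append]; rfl]
      rw [show ((occIdx cs c j ++ [j]).map (fTerm cs))
            = (occIdx cs c j).map (fTerm cs) ++ [fTerm cs j] by rw [List.map_append]; rfl]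
      rw [sumPrev_append, ih, List.sum_append]
      simp only [List.sum_cons, List.sum_nil, add_zero]
      congr 1
      have hlast : ((occIdx cs c j).map (fun i : ℕ => (i : Int))).getLast? =
          ((occIdx cs c j).getLast?).map (fun i : ℕ => (i : Int)) := by
        exact List.getLast?_map
      rw [hlast]
      unfold fTerm prevI
      rw [h]
      cases (occIdx cs c j).getLast? <;> simp
    · rw [if_neg (by simp only [beq_iff_eq]; exact h : ¬((cs.getD j ' ' == c) = true))]
      simpa using ih

lemma regroup (cs K : List Char) (hnd : K.Nodup) : ∀ (j : ℕ),
    (∀ i, i < j → cs.getD i ' ' ∈ K) →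
    (K.map (fun c => ((occIdx cs c j).map (fTerm cs)).sum)).sum
      = ((List.range j).map (fTerm cs)).sum := by
  intro j
  induction j with
  | zero => intro _; simp [occIdx]
  | succ j ih =>
    intro hmem
    have hstep : (K.map (fun c => ((occIdx cs c (j + 1)).map (fTerm cs)).sum))
        = K.map (fun c => ((occIdx cs c j).map (fTerm cs)).sum
            + (if cs.getD j ' ' = c then fTerm cs j else 0)) := by
      apply List.map_congr_left
      intro c _
      rw [occIdx_succ, List.map_append, List.sum_append]
      congr 1
      split_ifs <;> simp_all
    rw [hstep, PySem.List.sum_map_add_int,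
        sum_map_ite_of_nodup K (cs.getD j ' ') (fTerm cs j) hnd (hmem j (Nat.lt_succ_self j)),
        ih (fun i hi => hmem i (Nat.lt_succ_of_lt hi)),
        List.range_succ, List.map_append, List.sum_append]
    simp

lemma A_fold (cs : List Char) (j : ℕ) :
    (∀ c, ((List.range j).foldl
      (fun (st : PySem.Dict Char Int × Int) i =>
        (st.1.insert (cs.getD i ' ') (i : Int),
         st.2 + ((i : Int) - (match st.1.get? (cs.getD i ' ') with
                              | none => -1
                              | some v => v)) * ((cs.length : Int) - (i : Int))))
      (PySem.Dict.empty, 0)).1.get? c = (occIdx cs c j).getLast?.map (fun i : ℕ => (i : Int)))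
    ∧ ((List.range j).foldl
      (fun (st : PySem.Dict Char Int × Int) i =>
        (st.1.insert (cs.getD i ' ') (i : Int),
         st.2 + ((i : Int) - (match st.1.get? (cs.getD i ' ') with
                              | none => -1
                              | some v => v)) * ((cs.length : Int) - (i : Int))))
      (PySem.Dict.empty, 0)).2 = ((List.range j).map (fTerm cs)).sum := by
  induction j with
  | zero =>
    constructor
    · intro c; simp [occIdx, PySem.Dict.get?_empty]
    · simp
  | succ j ih =>
    obtain ⟨ih1, ih2⟩ := ih
    rw [List.range_succ, List.foldl_append]
    simp only [List.foldl_cons, List.foldl_nil]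
    constructor
    · intro c
      rw [PySem.Dict.get?_insert, occIdx_succ]
      by_cases hc : c = cs.getD j ' '
      · rw [if_pos hc, if_pos (beq_iff_eq.mpr hc.symm)]
        rw [List.getLast?_concat]
        rfl
      · rw [if_neg hc, ih1 c,
            if_neg (by simp only [beq_iff_eq]; exact fun h => hc h.symm :
              ¬((cs.getD j ' ' == c) = true))]
        simp
    · rw [ih2, List.map_append, List.sum_append]
      simp only [List.map_cons, List.map_nil, List.sum_cons, List.sum_nil, add_zero]
      congr 1
      rw [ih1 (cs.getD j ' ')]
      unfold fTerm prevI
      cases (occIdx cs (cs.getD j ' ') j).getLast? <;> simp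

def bDict (cs : List Char) : PySem.Dict Char (List Int) :=
  (List.range cs.length).foldl
    (fun (d : PySem.Dict Char (List Int)) i =>
      d.modify (cs.getD i ' ') [] (fun v => v ++ [(i : Int)])) PySem.Dict.empty

lemma bDict_getD (cs : List Char) (c : Char) :
    (bDict cs).getD c [] = (occIdx cs c cs.length).map (fun i : ℕ => (i : Int)) := by
  unfold bDict
  have hfm : (List.foldl (fun (d : PySem.Dict Char (List Int)) (i : ℕ) =>
        d.modify (cs.getD i ' ') [] (fun v => v ++ [(i : Int)]))
        PySem.Dict.empty (List.range cs.length))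
      = List.foldl (fun (d : PySem.Dict Char (List Int)) (p : Char × Int) =>
            d.modify p.1 [] (fun v => v ++ [p.2])) PySem.Dict.empty
          ((List.range cs.length).map (fun i : ℕ => (cs.getD i ' ', (i : Int)))) :=
    (@List.foldl_map ℕ (Char × Int) (PySem.Dict Char (List Int))
      (fun i : ℕ => (cs.getD i ' ', (i : Int)))
      (fun d p => d.modify p.1 [] (fun v => v ++ [p.2]))
      (List.range cs.length) PySem.Dict.empty).symm
  rw [hfm, PySem.Dict.getD_foldl_modify_append]
  rw [PySem.Dict.getD_empty, List.filter_map, List.map_map]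
  simp [occIdx, Function.comp_def]

lemma bDict_keys (cs : List Char) :
    (bDict cs).keys = PySem.Set.ofList ((List.range cs.length).map (fun i => cs.getD i ' ')) := by
  unfold bDict
  rw [PySem.Dict.keys_foldl_modify_key]
  rw [PySem.Dict.keys_empty, PySem.Set.update_nil_left]

lemma bDict_keys_nodup (cs : List Char) : (bDict cs).keys.Nodup := by
  rw [bDict_keys]; exact PySem.Set.nodup_ofList _

def perChar (n : ℕ) (ps : List Int) : Int :=
  pvTri (n : Int) -
    (((ps.zip (PySem.List.slice ps (some 1) none)).foldl
        (fun m ab => m + pvTri (ab.2 - ab.1 - 1)) (pvTri (PySem.List.pyGetD ps 0 0)))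
      + pvTri ((n : Int) - 1 - PySem.List.pyGetD ps (-1) 0))

lemma perChar_eq (cs : List Char) (c : Char) (hne : occIdx cs c cs.length ≠ []) :
    perChar cs.length ((occIdx cs c cs.length).map (fun i : ℕ => (i : Int)))
      = ((occIdx cs c cs.length).map (fTerm cs)).sum := by
  obtain ⟨a, t', ho⟩ := List.exists_cons_of_ne_nil hne
  rw [← occ_sum, ho]
  unfold perChar
  simp only [List.map_cons]
  rw [PySem.List.slice_from_one, List.tail_cons, PySem.List.pyGetD_zero_cons,
      PySem.List.pyGetD_neg_one _ _ (List.cons_ne_nil _ _),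
      zip_miss (cs.length : Int) (t'.map (fun i : ℕ => (i : Int))) (a : Int) (pvTri (a : Int))]
  have hm := miss_sumPrev (cs.length : Int)
      ((a : Int) :: t'.map (fun i : ℕ => (i : Int))) (-1)
  have e2 : ((cs.length : Int)) - 1 - -1 = (cs.length : Int) := by ring
  rw [e2] at hm
  have hmf : missFrom (cs.length : Int) (-1) ((a : Int) :: t'.map (fun i : ℕ => (i : Int)))
      = pvTri (a : Int) + missFrom (cs.length : Int) (a : Int) (t'.map (fun i : ℕ => (i : Int))) := by
    simp only [missFrom]
    congr 2
    ring
  linarith [hm, hmf]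

lemma B_eq_sum (s : String) :
    distinctCharCount_alt s = ((List.range s.toList.length).map (fTerm s.toList)).sum := by
  have hK : ∀ c ∈ (bDict s.toList).keys, occIdx s.toList c s.toList.length ≠ [] := by
    intro c hc
    rw [bDict_keys] at hc
    rcases List.mem_map.mp ((PySem.Set.mem_ofList _ _).mp hc) with ⟨i, hi, hci⟩
    have hmem : i ∈ occIdx s.toList c s.toList.length := by
      unfold occIdx
      exact List.mem_filter.mpr ⟨hi, by simpa using hci⟩
    exact List.ne_nil_of_mem hmem
  have h1 : distinctCharCount_alt s
      = 0 + ((bDict s.toList).values.map (perChar s.toList.length)).sum :=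
    PySem.List.foldl_add _ _ _
  rw [h1, zero_add,
      PySem.Dict.values_eq_map_keys _ (bDict_keys_nodup s.toList) [], List.map_map]
  have h2 : ∀ c ∈ (bDict s.toList).keys,
      (perChar s.toList.length ∘ fun k => (bDict s.toList).getD k []) c
        = ((occIdx s.toList c s.toList.length).map (fTerm s.toList)).sum := by
    intro c hc
    simp only [Function.comp_apply, bDict_getD]
    exact perChar_eq s.toList c (hK c hc)
  rw [List.map_congr_left h2]
  apply regroup
  · exact bDict_keys_nodup s.toList
  · intro i hi
    rw [bDict_keys]
    exact (PySem.Set.mem_ofList _ _).mpr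
      (List.mem_map.mpr ⟨i, List.mem_range.mpr hi, rfl⟩)

lemma A_eq_sum (s : String) :
    distinctCharCount s = ((List.range s.toList.length).map (fTerm s.toList)).sum := by
  exact (A_fold s.toList s.toList.length).2

-- ===== VERDICT (by name: the statement is the Claim_ definition above) =====
theorem distinctCharCount_spec : Claim_equal_distinctCharCount := by
  intro s _
  unfold Spec_distinctCharCount
  rw [A_eq_sum, B_eq_sum]
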